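-- pv_equiv track=rewrite | github.com/ParthDhabalia1024/DSA | Basic/imp_ques_3.py | ProductSmallestPair
-- ===== SOURCE A (Python) =====
-- def ProductSmallestPair(sum, arr):
--     arr.sort()
--     for i in range(len(arr)):
--         if arr[i] != arr[i+1]:
--             prod = arr[i]*arr[i+1]
--             return prod
--         else:
--             return 0
--     return prod
-- ===== SOURCE B (Python) =====
-- def ProductSmallestPair(sum, arr):
--     m1, m2 = arr[0], arr[1]
--     if m2 < m1:
--         m1, m2 = m2, m1
--     for x in arr[2:]:
--         if x < m1:
--             m1, m2 = x, m1
--         elif x < m2: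
--             m2 = x
--     return 0 if m1 == m2 else m1 * m2
-- ===== Notes on version B (the rewrite author's own statement) =====
-- stated objective: alternative
-- what changed: Replaces in-place sort followed by indexing arr[0]/arr[1] with a single linear pass that maintains the two smallest elements; B does not mutate arr.
import Mathlib
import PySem

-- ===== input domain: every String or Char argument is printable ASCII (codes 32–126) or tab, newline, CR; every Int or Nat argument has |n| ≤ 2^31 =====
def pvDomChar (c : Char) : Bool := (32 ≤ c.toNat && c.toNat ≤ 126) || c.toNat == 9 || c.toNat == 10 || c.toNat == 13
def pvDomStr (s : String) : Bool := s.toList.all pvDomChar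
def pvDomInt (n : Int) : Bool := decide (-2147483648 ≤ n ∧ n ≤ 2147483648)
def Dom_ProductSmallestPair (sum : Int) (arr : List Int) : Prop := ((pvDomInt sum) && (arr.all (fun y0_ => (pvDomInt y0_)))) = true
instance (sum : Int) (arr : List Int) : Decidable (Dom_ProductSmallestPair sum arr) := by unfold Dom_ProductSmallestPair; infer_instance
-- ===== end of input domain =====

-- B replaces A's in-place sort + indexing with a single pass keeping the two smallest
-- elements (objective: alternative). A sorts arr in place, B does not mutate it —
-- the equivalence proved here is about the RETURN value only.


-- ===== PORT A =====
-- the 'for i in range(len(arr))' loop; the body returns on its first iteration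
def pvALoop (s : List Int) : List Int → Int
  | [] => 0          -- Python falls through to 'return prod' with prod unbound (NameError); outside Pre_
  | i :: _ =>
    match PySem.List.pyGet? s i, PySem.List.pyGet? s (i + 1) with
    | some a, some b => if a ≠ b then a * b else 0
    | _, _ => 0      -- IndexError on arr[i+1]; outside Pre_

def ProductSmallestPair (sum : Int) (arr : List Int) : Int :=
  let s := PySem.List.sorted arr (fun x => x) false
  pvALoop s (PySem.List.pyRange 0 (s.length : Int) 1)

-- ===== PORT B =====
def pvStep (p : Int × Int) (x : Int) : Int × Int :=
  if x < p.1 then (x, p.1) else if x < p.2 then (p.1, x) else p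

def ProductSmallestPair_alt (sum : Int) (arr : List Int) : Int :=
  match arr with
  | a :: b :: rest =>
    let p := rest.foldl pvStep (if b < a then (b, a) else (a, b))
    if p.1 == p.2 then 0 else p.1 * p.2
  | _ => 0           -- Python B raises IndexError here (arr[0]/arr[1]); outside Pre_

-- ===== PRECONDITION & SPEC =====
-- Pre_: Python A raises on lists of length < 2 (IndexError on arr[1] for singletons,
-- NameError on the empty list); Python B raises IndexError there too.
def Pre_ProductSmallestPair (sum : Int) (arr : List Int) : Prop := 2 ≤ arr.length
instance (sum : Int) (arr : List Int) : Decidable (Pre_ProductSmallestPair sum arr) := by unfold Pre_ProductSmallestPair; infer_instance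
def pvWitness_ProductSmallestPair : Int × List Int := (0, [3, 1, 2])

def Spec_ProductSmallestPair (sum : Int) (arr : List Int) (out : Int) : Prop := out = ProductSmallestPair_alt sum arr
instance (sum : Int) (arr : List Int) (out : Int) : Decidable (Spec_ProductSmallestPair sum arr out) := by unfold Spec_ProductSmallestPair; infer_instance

-- ===== CLAIM (what is proved, stated in full; the proofs are below) =====
def Claim_equal_ProductSmallestPair : Prop := ∀ (sum : Int) (arr : List Int), Dom_ProductSmallestPair sum arr → Pre_ProductSmallestPair sum arr → Spec_ProductSmallestPair sum arr (ProductSmallestPair sum arr)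

-- ===== LEMMAS AND PROOFS =====

-- Loop invariant for B's single pass: the state stays ordered, its second component
-- only decreases, and together with some multiset l of discarded elements (all ≥ the
-- second component) it accounts for everything seen so far.
lemma foldB_inv (rest : List Int) : ∀ (m1 m2 : Int), m1 ≤ m2 →
    (rest.foldl pvStep (m1, m2)).1 ≤ (rest.foldl pvStep (m1, m2)).2 ∧
    (rest.foldl pvStep (m1, m2)).2 ≤ m2 ∧
    ∃ l : List Int,
      (m1 ::ₘ m2 ::ₘ (rest : Multiset Int)) =
        (rest.foldl pvStep (m1, m2)).1 ::ₘ (rest.foldl pvStep (m1, m2)).2 ::ₘ (l : Multiset Int) ∧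
      ∀ z ∈ l, (rest.foldl pvStep (m1, m2)).2 ≤ z := by
  induction rest with
  | nil =>
    intro m1 m2 h
    exact ⟨h, le_refl _, [], by simp, by simp⟩
  | cons x rs ih =>
    intro m1 m2 h
    simp only [List.foldl_cons]
    -- pvStep (m1,m2) x = (m1', m2') with m1' ≤ m2' ≤ m2, dropped element d ≥ m2',
    -- and {m1,m2,x} = {m1',m2',d} as multisets
    have step : ∃ m1' m2' d : Int, pvStep (m1, m2) x = (m1', m2') ∧ m1' ≤ m2' ∧ m2' ≤ m2 ∧
        m2' ≤ d ∧ (m1 ::ₘ m2 ::ₘ x ::ₘ (0 : Multiset Int)) = (m1' ::ₘ m2' ::ₘ d ::ₘ 0) := by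
      unfold pvStep
      by_cases h1 : x < m1
      · exact ⟨x, m1, m2, by simp [h1], le_of_lt h1, h, h, by
          rw [Multiset.cons_swap m2 x, Multiset.cons_swap m1 x]⟩
      · by_cases h2 : x < m2
        · exact ⟨m1, x, m2, by simp [h1, h2], le_of_not_gt h1, le_of_lt h2, le_of_lt h2, by
            rw [Multiset.cons_swap m2 x]⟩
        · exact ⟨m1, m2, x, by simp [h1, h2], h, le_refl _, le_of_not_gt h2, rfl⟩
    obtain ⟨m1', m2', d, hstep, h12, h2m, h2d, hms⟩ := step
    rw [hstep]
    obtain ⟨ha, hb, l, hperm, hl⟩ := ih m1' m2' h12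
    refine ⟨ha, le_trans hb h2m, d :: l, ?_, ?_⟩
    · -- multiset bookkeeping: {m1, m2, x :: rs} = {p1, p2, d :: l}
      have key : (m1 ::ₘ m2 ::ₘ x ::ₘ (rs : Multiset Int)) = m1' ::ₘ m2' ::ₘ d ::ₘ (rs : Multiset Int) := by
        have := congrArg (· + (rs : Multiset Int)) hms
        simpa using this
      calc (m1 ::ₘ m2 ::ₘ ((x :: rs : List Int) : Multiset Int))
          = m1 ::ₘ m2 ::ₘ x ::ₘ (rs : Multiset Int) := by simp
        _ = m1' ::ₘ m2' ::ₘ d ::ₘ (rs : Multiset Int) := key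
        _ = d ::ₘ (m1' ::ₘ m2' ::ₘ (rs : Multiset Int)) := by
              rw [Multiset.cons_swap m2' d, Multiset.cons_swap m1' d]
        _ = d ::ₘ ((rs.foldl pvStep (m1', m2')).1 ::ₘ (rs.foldl pvStep (m1', m2')).2 ::ₘ (l : Multiset Int)) := by
              rw [hperm]
        _ = (rs.foldl pvStep (m1', m2')).1 ::ₘ (rs.foldl pvStep (m1', m2')).2 ::ₘ ((d :: l : List Int) : Multiset Int) := by
              rw [Multiset.cons_swap d, Multiset.cons_swap d]; simp
    · intro z hz
      rcases List.mem_cons.mp hz with h' | h'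
      · exact h' ▸ le_trans hb h2d
      · exact hl z h'

theorem ProductSmallestPair_spec : Claim_equal_ProductSmallestPair := by
  intro sum arr _ hpre
  unfold Spec_ProductSmallestPair Pre_ProductSmallestPair at *
  match arr with
  | a :: b :: rest =>
    -- ordered initial pair, a permutation of [a, b]
    set init : Int × Int := if b < a then (b, a) else (a, b) with hinit
    have hord : init.1 ≤ init.2 := by
      rw [hinit]; split_ifs with h
      · exact le_of_lt h
      · exact le_of_not_gt h
    have hinitms : (a ::ₘ b ::ₘ (0 : Multiset Int)) = init.1 ::ₘ init.2 ::ₘ 0 := by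
      rw [hinit]; split_ifs
      · rw [Multiset.cons_swap]
      · rfl
    obtain ⟨h12, _, l, hperm, hl⟩ := foldB_inv rest init.1 init.2 hord
    set p := rest.foldl pvStep (init.1, init.2) with hp
    -- the sorted list is p.1 :: p.2 :: sorted l
    have harrms : ((a :: b :: rest : List Int) : Multiset Int) = p.1 ::ₘ p.2 ::ₘ (l : Multiset Int) := by
      have key : (a ::ₘ b ::ₘ (rest : Multiset Int)) = init.1 ::ₘ init.2 ::ₘ (rest : Multiset Int) := by
        have := congrArg (· + (rest : Multiset Int)) hinitms
        simpa using this
      calc ((a :: b :: rest : List Int) : Multiset Int)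
          = a ::ₘ b ::ₘ (rest : Multiset Int) := by simp
        _ = init.1 ::ₘ init.2 ::ₘ (rest : Multiset Int) := key
        _ = p.1 ::ₘ p.2 ::ₘ (l : Multiset Int) := hperm
    have hpermL : (p.1 :: p.2 :: PySem.List.sorted l (fun x => x) false).Perm (a :: b :: rest) := by
      have hsl : (PySem.List.sorted l (fun x => x) false).Perm l := PySem.List.sorted_perm l _ _
      rw [← Multiset.coe_eq_coe]
      calc ((p.1 :: p.2 :: PySem.List.sorted l (fun x => x) false : List Int) : Multiset Int)
          = p.1 ::ₘ p.2 ::ₘ ((PySem.List.sorted l (fun x => x) false : List Int) : Multiset Int) := by simp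
        _ = p.1 ::ₘ p.2 ::ₘ (l : Multiset Int) := by rw [Multiset.coe_eq_coe.mpr hsl]
        _ = ((a :: b :: rest : List Int) : Multiset Int) := harrms.symm
    have hpw : (p.1 :: p.2 :: PySem.List.sorted l (fun x => x) false).Pairwise (· ≤ ·) := by
      refine List.pairwise_cons.mpr ⟨?_, List.pairwise_cons.mpr ⟨?_, ?_⟩⟩
      · intro z hz
        rcases List.mem_cons.mp hz with h' | h'
        · exact h' ▸ h12
        · exact le_trans h12 (hl z ((PySem.List.mem_sorted _ _ _ _).mp h'))
      · intro z hz
        exact hl z ((PySem.List.mem_sorted _ _ _ _).mp hz)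
      · have := PySem.List.sorted_pairwise l (fun x => x)
        simpa using this
    have hsorted : PySem.List.sorted (a :: b :: rest) (fun x => x) false
        = p.1 :: p.2 :: PySem.List.sorted l (fun x => x) false :=
      PySem.List.sorted_id_eq_of_perm_of_pairwise (a :: b :: rest) _ hpermL hpw
    -- evaluate A on the sorted list
    show ProductSmallestPair sum (a :: b :: rest) = ProductSmallestPair_alt sum (a :: b :: rest)
    unfold ProductSmallestPair ProductSmallestPair_alt
    simp only [hsorted]
    have hlen : (0 : Int) < ((p.1 :: p.2 :: PySem.List.sorted l (fun x => x) false).length : Int) := by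
      simp; omega
    rw [PySem.List.pyRange_one_cons hlen]
    unfold pvALoop
    simp only [PySem.List.pyGet?_zero_cons]
    have h1 : PySem.List.pyGet? (p.1 :: p.2 :: PySem.List.sorted l (fun x => x) false) (0 + 1)
        = some p.2 := by
      norm_num [PySem.List.pyGet?, PySem.List.pyIdx?]
    rw [h1]
    rcases eq_or_ne p.1 p.2 with heq | heq
    · simp [hp, hinit, heq]
    · simp only [hp, hinit] at heq ⊢
      simp [heq]
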